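-- pv_equiv track=rewrite | github.com/ellanorai/ThinkRL | thinkrl/training/rl_utils.py | sample_groups
-- ===== SOURCE A (Python) =====
-- def sample_groups(
--     prompts: list[str],
--     num_samples_per_prompt: int = 4,
-- ) -> tuple[list[str], list[int]]:
--     """
--     Expand prompts for group sampling.
--
--     Args:
--         prompts: Original prompts
--         num_samples_per_prompt: Number of samples per prompt
--
--     Returns:
--         Tuple of (expanded prompts, group indices)
--     """
--     expanded_prompts = []
--     group_indices = []
--
--     for i, prompt in enumerate(prompts):
--         for _ in range(num_samples_per_prompt):
--             expanded_prompts.append(prompt)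
--             group_indices.append(i)
--
--     return expanded_prompts, group_indices
-- ===== SOURCE B (Python) =====
-- def sample_groups(
--     prompts: list[str],
--     num_samples_per_prompt: int = 4,
-- ) -> tuple[list[str], list[int]]:
--     total = len(prompts) * num_samples_per_prompt
--     group_indices = [j // num_samples_per_prompt for j in range(total)]
--     expanded_prompts = [prompts[j // num_samples_per_prompt] for j in range(total)]
--     return expanded_prompts, group_indices
-- ===== Notes on version B (the rewrite author's own statement) =====
-- stated objective: alternative
-- what changed: Replaces the nested enumerate/range loops that append element-by-element with two flat comprehensions over range(len(prompts)*k), recovering the group index of each output slot by integer division.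
import Mathlib
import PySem

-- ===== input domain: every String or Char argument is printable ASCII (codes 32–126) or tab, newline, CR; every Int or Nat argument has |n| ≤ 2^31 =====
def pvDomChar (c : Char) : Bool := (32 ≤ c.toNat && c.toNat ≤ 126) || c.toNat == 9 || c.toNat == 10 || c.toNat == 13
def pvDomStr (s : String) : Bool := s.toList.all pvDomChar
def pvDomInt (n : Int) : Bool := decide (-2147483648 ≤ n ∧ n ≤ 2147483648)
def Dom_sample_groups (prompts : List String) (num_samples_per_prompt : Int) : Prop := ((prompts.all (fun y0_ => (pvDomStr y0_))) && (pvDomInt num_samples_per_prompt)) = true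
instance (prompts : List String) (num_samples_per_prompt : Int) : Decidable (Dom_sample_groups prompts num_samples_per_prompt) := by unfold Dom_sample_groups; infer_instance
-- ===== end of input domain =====

-- B replaces A's nested enumerate/range append loops by two flat comprehensions over
-- range(len(prompts)*k), recovering each group index by integer division (alternative decomposition).


-- ===== PORT A =====
-- nested loops: for i, prompt in enumerate(prompts): for _ in range(k): append
def sample_groups (prompts : List String) (num_samples_per_prompt : Int) : List String × List Int :=
  (PySem.List.enumerate prompts 0).foldl
    (fun acc ip =>
      (PySem.List.pyRange 0 num_samples_per_prompt 1).foldl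
        (fun acc2 _ => (acc2.1 ++ [ip.2], acc2.2 ++ [ip.1])) acc)
    ([], [])

-- ===== PORT B =====
-- flat comprehensions over range(total); prompts[j // k] is always in range when total > 0,
-- so pyGetD's default "" is never used and the port is exact.
def sample_groups_alt (prompts : List String) (num_samples_per_prompt : Int) : List String × List Int :=
  let total := PySem.List.len prompts * num_samples_per_prompt
  let group_indices := (PySem.List.pyRange 0 total 1).map
    (fun j => PySem.Int.floordiv j num_samples_per_prompt)
  let expanded_prompts := (PySem.List.pyRange 0 total 1).map
    (fun j => PySem.List.pyGetD prompts (PySem.Int.floordiv j num_samples_per_prompt) "")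
  (expanded_prompts, group_indices)

-- ===== PRECONDITION & SPEC =====
def Spec_sample_groups (prompts : List String) (num_samples_per_prompt : Int) (out : List String × List Int) : Prop := out = sample_groups_alt prompts num_samples_per_prompt
instance (prompts : List String) (num_samples_per_prompt : Int) (out : List String × List Int) : Decidable (Spec_sample_groups prompts num_samples_per_prompt out) := by unfold Spec_sample_groups; infer_instance

-- ===== CLAIM (what is proved, stated in full; the proofs are below) =====
def Claim_equal_sample_groups : Prop := ∀ (prompts : List String) (num_samples_per_prompt : Int), Dom_sample_groups prompts num_samples_per_prompt → Spec_sample_groups prompts num_samples_per_prompt (sample_groups prompts num_samples_per_prompt)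

-- ===== LEMMAS AND PROOFS =====

/-- The inner loop of A appends `l.length` copies (the loop body ignores the element). -/
theorem inner_foldl_const {p : String} {i : Int} (l : List Int) :
    ∀ acc : List String × List Int,
      l.foldl (fun acc2 (_ : Int) => (acc2.1 ++ [p], acc2.2 ++ [i])) acc
        = (acc.1 ++ List.replicate l.length p, acc.2 ++ List.replicate l.length i) := by
  induction l with
  | nil => intro acc; simp
  | cons x xs ih =>
      intro acc
      simp only [List.foldl_cons, ih, List.length_cons]
      refine Prod.ext ?_ ?_ <;>
        simp [List.append_assoc, ← List.replicate_succ,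
          List.replicate_succ']

/-- The outer loop of A with block-appending body is a flatMap. -/
theorem outer_foldl_flatMap (k' : Nat) (l : List (Int × String)) :
    ∀ acc : List String × List Int,
      l.foldl (fun acc ip => (acc.1 ++ List.replicate k' ip.2, acc.2 ++ List.replicate k' ip.1)) acc
        = (acc.1 ++ l.flatMap (fun ip => List.replicate k' ip.2),
           acc.2 ++ l.flatMap (fun ip => List.replicate k' ip.1)) := by
  induction l with
  | nil => intro acc; simp
  | cons x xs ih =>
      intro acc
      simp only [List.foldl_cons, ih, List.flatMap_cons, ← List.append_assoc]

/-- Flat map over `range (n*k)` with index recovery `j / k` is a flatMap of replicates. -/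
theorem map_div_range_mul {beta : Type} (k : Nat) (hk : 0 < k) (f : Nat → beta) (n : Nat) :
    (List.range (n * k)).map (fun j => f (j / k))
      = (List.range n).flatMap (fun i => List.replicate k (f i)) := by
  induction n with
  | zero => simp
  | succ m ih =>
      have hrange : List.range ((m + 1) * k) = List.range (m * k) ++ (List.range k).map (m * k + ·) := by
        rw [Nat.succ_mul, List.range_add]
      rw [hrange, List.map_append, ih, List.range_succ, List.flatMap_append]
      congr 1
      have hrep : List.replicate k (f m) = (List.range k).map (fun _ => f m) := by
        simp [List.map_const']
      simp only [List.flatMap_cons, List.flatMap_nil, List.append_nil, List.map_map, hrep]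
      apply List.map_congr_left
      intro r hr
      have hrk : r < k := List.mem_range.mp hr
      simp only [Function.comp_apply]
      congr 1
      rw [Nat.mul_comm, Nat.mul_add_div hk, Nat.div_eq_of_lt hrk, Nat.add_zero]

theorem sample_groups_eq (prompts : List String) (k : Int) :
    sample_groups prompts k = sample_groups_alt prompts k := by
  by_cases hk : k ≤ 0
  · -- both sides are ([], []) : the inner range and range(total) are empty
    have h1 : PySem.List.pyRange 0 k 1 = [] := PySem.List.pyRange_one_eq_nil hk
    have h2 : PySem.List.pyRange 0 ((prompts.length : Int) * k) 1 = [] :=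
      PySem.List.pyRange_one_eq_nil
        (mul_nonpos_of_nonneg_of_nonpos (Int.natCast_nonneg _) hk)
    simp [sample_groups, sample_groups_alt, PySem.List.len_eq, h1, h2]
  · replace hk : 0 < k := by omega
    set n := prompts.length with hn
    set k' := k.toNat with hk'
    have hkk : (k' : Int) = k := Int.toNat_of_nonneg (le_of_lt hk)
    have hk'pos : 0 < k' := by omega
    -- A's nested loops compute a flatMap of replicates over enumerate
    have hA : sample_groups prompts k
        = ((PySem.List.enumerate prompts 0).flatMap (fun ip => List.replicate k' ip.2),
           (PySem.List.enumerate prompts 0).flatMap (fun ip => List.replicate k' ip.1)) := by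
      unfold sample_groups
      have hlen : (PySem.List.pyRange 0 k 1).length = k' := by
        rw [PySem.List.length_pyRange_one]; omega
      rw [PySem.List.foldl_congr_mem (PySem.List.enumerate prompts 0) _
            (fun acc ip => (acc.1 ++ List.replicate k' ip.2, acc.2 ++ List.replicate k' ip.1))
            ([], [])
            (fun acc ip _ => by rw [inner_foldl_const, hlen]),
          outer_foldl_flatMap]
      simp
    -- the ranges, as maps over List.range
    have htot : ((PySem.List.len prompts * k) - 0).toNat = n * k' := by
      have hlen : PySem.List.len prompts = (n : Int) := by simp [PySem.List.len_eq, hn]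
      rw [Int.sub_zero, hlen, ← hkk]
      exact_mod_cast rfl
    have hrange : PySem.List.pyRange 0 (PySem.List.len prompts * k) 1
        = (List.range (n * k')).map (fun j : Nat => (j : Int)) := by
      rw [PySem.List.pyRange_one, htot]
      exact List.map_congr_left (fun j _ => by omega)
    have hrn : PySem.List.pyRange 0 (PySem.List.len prompts) 1
        = (List.range n).map (fun j : Nat => (j : Int)) := by
      rw [PySem.List.pyRange_one]
      have : ((PySem.List.len prompts) - 0).toNat = n := by
        simp [PySem.List.len_eq, hn]
      rw [this]
      exact List.map_congr_left (fun j _ => by omega)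
    have hdiv : ∀ j : Nat, PySem.Int.floordiv (j : Int) k = ((j / k' : Nat) : Int) := by
      intro j
      rw [← hkk]
      exact PySem.Int.floordiv_natCast j k'
    -- B's comprehensions, normalised over List.range (n * k')
    have hB : sample_groups_alt prompts k
        = ((List.range (n * k')).map (fun j => PySem.List.pyGetD prompts ((j / k' : Nat) : Int) ""),
           (List.range (n * k')).map (fun j => ((j / k' : Nat) : Int))) := by
      unfold sample_groups_alt
      rw [Prod.mk.injEq]
      refine ⟨?_, ?_⟩ <;>
        (rw [hrange, List.map_map]
         apply List.map_congr_left
         intro j _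
         simp only [Function.comp_apply, hdiv j])
      
    rw [hA, hB, PySem.List.enumerate_eq_map_pyRange prompts "", hrn,
      map_div_range_mul k' hk'pos (fun i => PySem.List.pyGetD prompts (i : Int) "") n,
      map_div_range_mul k' hk'pos (fun i : Nat => (i : Int)) n]
    simp [List.flatMap_map, List.map_map, Function.comp_def]

-- ===== VERDICT (by name: the statement is the Claim_ definition above) =====
theorem sample_groups_spec : Claim_equal_sample_groups := by
  intro prompts k _
  unfold Spec_sample_groups
  exact sample_groups_eq prompts k
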